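-- pv_equiv track=rewrite | github.com/remigenet/ASThetic | main/ast_smart_loader.py | implied_previous_needs
-- ===== SOURCE A (Python) =====
-- from typing import Callable, Any, Tuple, Set, List, Optional, Union, Iterable, Dict
--
-- def implied_previous_needs(node_adds: List[Set[str]], node_costs: List[Set[str]], selected: List[bool]) -> Tuple[
--     List[Set[str]], List[Set[str]], List[Set[str]]]:
--     assets = [set().union(*(s for s, b in zip(node_adds[:end], selected[:end]) if b)) if any(selected[:end]) else set()
--               for end in range(len(node_adds)+1)]
--     needs = [set().union(*(s for s, b in zip(node_costs[:end], selected[:end]) if b)) if any(selected[:end]) else set()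
--              for end in range(len(node_adds)+1)]
--     if needs[0]:
--         raise ImportError(f'You should not have first need different from 0 {needs[0]}')
--     missing: List[Set[str]] = [needs[0]] + [n - a for n, a in zip(needs[1:], assets[:-1])]
--     return assets, needs, missing
-- ===== SOURCE B (Python) =====
-- def implied_previous_needs(node_adds, node_costs, selected):
--     assets = [set()]
--     needs = [set()]
--     missing = [set()]
--     cur_assets = set()
--     cur_needs = set()
--     for i in range(len(node_adds)):
--         prev_assets = cur_assets
--         if i < len(selected) and selected[i]:
--             cur_assets = cur_assets | node_adds[i]
--             if i < len(node_costs):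
--                 cur_needs = cur_needs | node_costs[i]
--         assets.append(cur_assets)
--         needs.append(cur_needs)
--         missing.append(cur_needs - prev_assets)
--     return assets, needs, missing
-- ===== Notes on version B (the rewrite author's own statement) =====
-- stated objective: alternative
-- what changed: Replaces A's per-prefix recomputation (for every end, re-slice the lists and re-union all selected sets from scratch) by a single loop that maintains the running asset/need unions incrementally and emits assets, needs and missing together.
import Mathlib
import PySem

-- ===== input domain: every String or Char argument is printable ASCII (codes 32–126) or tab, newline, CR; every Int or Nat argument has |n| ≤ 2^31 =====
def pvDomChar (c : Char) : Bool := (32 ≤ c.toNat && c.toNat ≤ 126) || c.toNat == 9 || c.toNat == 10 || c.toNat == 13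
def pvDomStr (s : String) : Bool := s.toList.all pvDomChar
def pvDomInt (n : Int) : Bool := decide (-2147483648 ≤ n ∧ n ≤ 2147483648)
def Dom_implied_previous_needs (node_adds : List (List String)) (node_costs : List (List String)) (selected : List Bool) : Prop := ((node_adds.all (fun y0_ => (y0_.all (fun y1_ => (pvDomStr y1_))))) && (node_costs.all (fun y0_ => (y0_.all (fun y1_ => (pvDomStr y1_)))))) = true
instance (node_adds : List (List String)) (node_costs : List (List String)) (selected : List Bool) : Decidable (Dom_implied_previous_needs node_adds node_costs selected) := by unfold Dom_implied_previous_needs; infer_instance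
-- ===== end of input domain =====

-- B replaces A's per-prefix recomputation of the selected unions (re-sliced and re-unioned for
-- every end) by a single pass maintaining the running unions incrementally (objective: alternative).

-- ===== PORT A =====
-- '(s for s, b in zip(xs[:e], selected[:e]) if b)' — the selected member sets of the length-e prefix
def pvSelSets (xs : List (List String)) (selected : List Bool) (e : Nat) : List (List String) :=
  (((xs.take e).zip (selected.take e)).filter (fun p => p.2)).map (fun p => p.1)

-- 'set().union(*ss)'
def pvUnionAll (ss : List (List String)) : List String :=
  ss.foldl (fun acc s => PySem.Set.union acc s) ([] : List String)

def implied_previous_needs (node_adds : List (List String)) (node_costs : List (List String)) (selected : List Bool) : List (List String) × List (List String) × List (List String) :=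
  let assets := (List.range (node_adds.length + 1)).map (fun e =>
    if (selected.take e).any (fun b => b) then pvUnionAll (pvSelSets node_adds selected e) else [])
  let needs := (List.range (node_adds.length + 1)).map (fun e =>
    if (selected.take e).any (fun b => b) then pvUnionAll (pvSelSets node_costs selected e) else [])
  -- Python's 'if needs[0]: raise ImportError(...)' is dead code: needs[0] is the union over the
  -- empty prefix (end = 0), always ∅, so the raise branch is unreachable and its value never produced
  if needs.headD [] ≠ [] then ([], [], [])
  else
    (assets, needs,
     [needs.headD []] ++ ((needs.drop 1).zip assets.dropLast).map (fun p => PySem.Set.diff p.1 p.2))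

-- ===== PORT B =====
-- the body of B's single for-loop; state = (assets, needs, missing, cur_assets, cur_needs)
def pvStep (node_adds : List (List String)) (node_costs : List (List String)) (selected : List Bool)
    (st : List (List String) × List (List String) × List (List String) × List String × List String)
    (i : Nat) : List (List String) × List (List String) × List (List String) × List String × List String :=
  let prevA := st.2.2.2.1
  let cur :=
    if i < selected.length ∧ selected.getD i false then
      (PySem.Set.union st.2.2.2.1 (node_adds.getD i []),   -- getD exact: 0 ≤ i < len(node_adds)
       if i < node_costs.length then PySem.Set.union st.2.2.2.2 (node_costs.getD i []) else st.2.2.2.2)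
    else (st.2.2.2.1, st.2.2.2.2)
  (st.1 ++ [cur.1], st.2.1 ++ [cur.2], st.2.2.1 ++ [PySem.Set.diff cur.2 prevA], cur.1, cur.2)

def implied_previous_needs_alt (node_adds : List (List String)) (node_costs : List (List String)) (selected : List Bool) : List (List String) × List (List String) × List (List String) :=
  let fin := (List.range node_adds.length).foldl (pvStep node_adds node_costs selected)
      ([([] : List String)], [([] : List String)], [([] : List String)], ([] : List String), ([] : List String))
  (fin.1, fin.2.1, fin.2.2.1)

-- ===== PRECONDITION & SPEC =====
def Spec_implied_previous_needs (node_adds : List (List String)) (node_costs : List (List String)) (selected : List Bool) (out : List (List String) × List (List String) × List (List String)) : Prop := out = implied_previous_needs_alt node_adds node_costs selected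
instance (node_adds : List (List String)) (node_costs : List (List String)) (selected : List Bool) (out : List (List String) × List (List String) × List (List String)) : Decidable (Spec_implied_previous_needs node_adds node_costs selected out) := by unfold Spec_implied_previous_needs; infer_instance

-- ===== CLAIM (what is proved, stated in full; the proofs are below) =====
def Claim_equal_implied_previous_needs : Prop := ∀ (node_adds : List (List String)) (node_costs : List (List String)) (selected : List Bool), Dom_implied_previous_needs node_adds node_costs selected → Spec_implied_previous_needs node_adds node_costs selected (implied_previous_needs node_adds node_costs selected)

-- ===== LEMMAS AND PROOFS =====

-- the running prefix union: pvF xs sel e = A's union over the length-e prefix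
def pvF (xs : List (List String)) (selected : List Bool) (e : Nat) : List String :=
  pvUnionAll (pvSelSets xs selected e)

-- the e-th missing set
def pvM (node_adds : List (List String)) (node_costs : List (List String)) (selected : List Bool) : Nat → List String
  | 0 => []
  | (e+1) => PySem.Set.diff (pvF node_costs selected (e+1)) (pvF node_adds selected e)

theorem pvSelSets_succ (xs : List (List String)) (sel : List Bool) (e : Nat) :
    pvSelSets xs sel (e+1) =
      pvSelSets xs sel e ++
        (if e < xs.length ∧ e < sel.length ∧ sel.getD e false then [xs.getD e []] else []) := by
  induction xs generalizing sel e with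
  | nil => simp [pvSelSets]
  | cons x xs ih =>
    cases sel with
    | nil => simp [pvSelSets]
    | cons b sel =>
      cases e with
      | zero =>
        simp [pvSelSets]
        cases b <;> simp
      | succ e =>
        have hcons : ∀ m, pvSelSets (x :: xs) (b :: sel) (m+1)
            = (if b then [x] else []) ++ pvSelSets xs sel m := by
          intro m
          simp [pvSelSets]
          cases b <;> simp
        rw [hcons (e+1), hcons e, ih sel e, List.append_assoc]
        simp

theorem pvUnionAll_concat (l : List (List String)) (s : List String) :
    pvUnionAll (l ++ [s]) = PySem.Set.union (pvUnionAll l) s := by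
  simp [pvUnionAll]

theorem pvF_zero (xs : List (List String)) (sel : List Bool) : pvF xs sel 0 = [] := rfl

theorem pvF_succ (xs : List (List String)) (sel : List Bool) (e : Nat) :
    pvF xs sel (e+1) =
      if e < xs.length ∧ e < sel.length ∧ sel.getD e false then
        PySem.Set.union (pvF xs sel e) (xs.getD e [])
      else pvF xs sel e := by
  unfold pvF
  rw [pvSelSets_succ]
  split_ifs with h
  · rw [pvUnionAll_concat]
  · simp

-- when e < xs.length, the xs-bound in the condition is redundant (A's assets step)
theorem pvF_succ_of_lt (xs : List (List String)) (sel : List Bool) (e : Nat) (h : e < xs.length) :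
    pvF xs sel (e+1) =
      if e < sel.length ∧ sel.getD e false then
        PySem.Set.union (pvF xs sel e) (xs.getD e [])
      else pvF xs sel e := by
  rw [pvF_succ]
  split_ifs with h1 h2 <;> tauto

-- the needs step in B's nested-if shape
theorem pvF_costs_succ (costs : List (List String)) (sel : List Bool) (e : Nat) :
    pvF costs sel (e+1) =
      if e < sel.length ∧ sel.getD e false then
        (if e < costs.length then PySem.Set.union (pvF costs sel e) (costs.getD e []) else pvF costs sel e)
      else pvF costs sel e := by
  rw [pvF_succ]
  split_ifs <;> tauto

-- no selected entry in the prefix ⇒ the generator is empty ⇒ the union is ∅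
theorem pvF_of_not_any (xs : List (List String)) (sel : List Bool) (e : Nat)
    (h : ¬ (sel.take e).any (fun b => b)) : pvF xs sel e = [] := by
  have hnil : pvSelSets xs sel e = [] := by
    unfold pvSelSets
    rw [List.map_eq_nil_iff, List.filter_eq_nil_iff]
    intro p hp hb
    exact h (List.any_eq_true.mpr ⟨p.2, (List.of_mem_zip hp).2, hb⟩)
  unfold pvF
  rw [hnil]
  rfl

-- loop invariant: after k iterations B holds the first k+1 prefix results and the running unions
theorem pvFold_inv (node_adds node_costs : List (List String)) (sel : List Bool) :
    ∀ k, k ≤ node_adds.length →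
      (List.range k).foldl (pvStep node_adds node_costs sel)
          ([([] : List String)], [([] : List String)], [([] : List String)], ([] : List String), ([] : List String))
        = ((List.range (k+1)).map (pvF node_adds sel),
           (List.range (k+1)).map (pvF node_costs sel),
           (List.range (k+1)).map (pvM node_adds node_costs sel),
           pvF node_adds sel k, pvF node_costs sel k) := by
  intro k
  induction k with
  | zero => intro _; simp [pvF_zero, pvM, List.range_succ]
  | succ k ih =>
    intro hk
    have hk' : k ≤ node_adds.length := Nat.le_of_succ_le hk
    have hlt : k < node_adds.length := hk
    rw [List.range_succ, List.foldl_append, List.foldl_cons, List.foldl_nil, ih hk']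
    show pvStep node_adds node_costs sel _ k = _
    unfold pvStep
    simp only []
    have hr : ∀ f : Nat → List String,
        (List.range (k+1+1)).map f = (List.range (k+1)).map f ++ [f (k+1)] := by
      intro f; rw [List.range_succ, List.map_append, List.map_singleton]
    rw [hr (pvF node_adds sel), hr (pvF node_costs sel), hr (pvM node_adds node_costs sel)]
    have hm : pvM node_adds node_costs sel (k+1)
        = PySem.Set.diff (pvF node_costs sel (k+1)) (pvF node_adds sel k) := rfl
    rw [hm, pvF_succ_of_lt node_adds sel k hlt, pvF_costs_succ node_costs sel k]
    split_ifs <;> rfl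

theorem implied_previous_needs_eq (node_adds node_costs : List (List String)) (sel : List Bool) :
    implied_previous_needs node_adds node_costs sel = implied_previous_needs_alt node_adds node_costs sel := by
  unfold implied_previous_needs implied_previous_needs_alt
  rw [pvFold_inv node_adds node_costs sel node_adds.length (Nat.le_refl _)]
  have hmapA : (List.range (node_adds.length + 1)).map (fun e =>
      if (sel.take e).any (fun b => b) then pvUnionAll (pvSelSets node_adds sel e) else [])
      = (List.range (node_adds.length + 1)).map (pvF node_adds sel) := by
    apply List.map_congr_left
    intro e _
    by_cases h : (sel.take e).any (fun b => b)
    · simp [h, pvF]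
    · simp [h, pvF_of_not_any node_adds sel e h]
  have hmapN : (List.range (node_adds.length + 1)).map (fun e =>
      if (sel.take e).any (fun b => b) then pvUnionAll (pvSelSets node_costs sel e) else [])
      = (List.range (node_adds.length + 1)).map (pvF node_costs sel) := by
    apply List.map_congr_left
    intro e _
    by_cases h : (sel.take e).any (fun b => b)
    · simp [h, pvF]
    · simp [h, pvF_of_not_any node_costs sel e h]
  simp only [hmapA, hmapN]
  have hhead : ((List.range (node_adds.length + 1)).map (pvF node_costs sel)).headD [] = [] := by
    rw [List.range_succ_eq_map]
    simp [pvF_zero]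
  rw [hhead]
  simp only [ne_eq, not_true_eq_false, if_false]
  refine Prod.ext rfl (Prod.ext rfl ?_)
  -- the missing lists agree
  have hdrop : ((List.range (node_adds.length + 1)).map (pvF node_costs sel)).drop 1
      = (List.range node_adds.length).map (fun e => pvF node_costs sel (e+1)) := by
    rw [List.range_succ_eq_map]
    simp [List.map_map, Function.comp]
  have hlast : ((List.range (node_adds.length + 1)).map (pvF node_adds sel)).dropLast
      = (List.range node_adds.length).map (pvF node_adds sel) := by
    rw [List.range_succ, List.map_append, List.map_singleton, List.dropLast_concat]
  rw [hdrop, hlast, List.zip_map', List.map_map]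
  rw [List.range_succ_eq_map]
  simp [pvM, List.map_map, Function.comp]

-- ===== VERDICT (by name: the statement is the Claim_ definition above) =====
theorem implied_previous_needs_spec : Claim_equal_implied_previous_needs := by
  intro node_adds node_costs selected _
  unfold Spec_implied_previous_needs
  exact implied_previous_needs_eq node_adds node_costs selected
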